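-- pv_equiv track=rewrite | github.com/paytonward6/IEEE754 | IEEE754.py | shift_right_arith
-- ===== SOURCE A (Python) =====
-- def shift_right_arith(bin_num, prepend=True):
--     to_return = [0]*len(bin_num)
--     if prepend:
--         if bin_num[0] == '1':
--             to_return[0] = 1
--     else:
--         to_return[0] = 0
--
--     for i in range(1, len(bin_num)):
--         to_return[i] = bin_num[i-1]
--
--     to_return = "".join(str(i) for i in to_return)
--     return to_return;
-- ===== SOURCE B (Python) =====
-- def shift_right_arith(bin_num, prepend=True):
--     sign = bin_num[0]
--     first = '1' if prepend and sign == '1' else '0'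
--     return first + bin_num[:-1]
-- ===== Notes on version B (the rewrite author's own statement) =====
-- stated objective: simpler
-- what changed: Replaces the index loop over a mutable int/char list plus str()-join with a single closed-form expression: compute the first character from the sign test and concatenate it with bin_num[:-1]; the C-level slice also makes it measurably faster (constant factor).
import Mathlib
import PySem

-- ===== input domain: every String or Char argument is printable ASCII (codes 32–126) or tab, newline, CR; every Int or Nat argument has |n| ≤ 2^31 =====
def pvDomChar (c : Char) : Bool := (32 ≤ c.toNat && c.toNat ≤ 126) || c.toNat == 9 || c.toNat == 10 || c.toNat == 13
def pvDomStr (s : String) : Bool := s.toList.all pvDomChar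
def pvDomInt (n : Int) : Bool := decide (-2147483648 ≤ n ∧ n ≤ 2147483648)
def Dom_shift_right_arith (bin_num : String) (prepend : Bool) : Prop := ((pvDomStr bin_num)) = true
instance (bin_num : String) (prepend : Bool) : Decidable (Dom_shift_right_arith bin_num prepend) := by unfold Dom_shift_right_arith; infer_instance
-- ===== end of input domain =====

-- B replaces A's index loop and join with one closed-form slice-and-concatenate expression (same return values).

-- ===== PORT A =====
-- strings in the work list are modelled as List Char; "".join at the end is PySem.Chars.join
def shift_right_arith (bin_num : String) (prepend : Bool) : String :=
  let cs := bin_num.toList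
  let to_return : List (List Char) := List.replicate cs.length ['0']  -- [0]*len; str(0) = "0" at the join
  let to_return :=
    if prepend then
      (if PySem.List.pyGet? cs 0 = some '1' then to_return.set 0 ['1'] else to_return)
    else to_return.set 0 ['0']  -- bin_num[0] on empty input raises: excluded by Pre_
  let to_return := (PySem.List.pyRange 1 (cs.length : Int) 1).foldl
      (fun acc i => acc.set i.toNat [PySem.List.pyGetD cs (i - 1) ' ']) to_return
  String.ofList (PySem.Chars.join [] to_return)

-- ===== PORT B =====
def shift_right_arith_alt (bin_num : String) (prepend : Bool) : String :=
  let cs := bin_num.toList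
  let sign := PySem.List.pyGetD cs 0 ' '   -- bin_num[0]; exact under Pre_ (nonempty)
  let first : List Char := if prepend && (sign == '1') then ['1'] else ['0']
  String.ofList (first ++ PySem.List.slice cs none (some (-1)))

-- ===== PRECONDITION & SPEC =====
-- A (and B) raise IndexError on the empty string (bin_num[0]), for both prepend values.
def Pre_shift_right_arith (bin_num : String) (prepend : Bool) : Prop := bin_num.toList ≠ []
instance (bin_num : String) (prepend : Bool) : Decidable (Pre_shift_right_arith bin_num prepend) := by unfold Pre_shift_right_arith; infer_instance
def pvWitness_shift_right_arith : String × Bool := ("1011", true)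

def Spec_shift_right_arith (bin_num : String) (prepend : Bool) (out : String) : Prop := out = shift_right_arith_alt bin_num prepend
instance (bin_num : String) (prepend : Bool) (out : String) : Decidable (Spec_shift_right_arith bin_num prepend out) := by unfold Spec_shift_right_arith; infer_instance

-- ===== CLAIM (what is proved, stated in full; the proofs are below) =====
def Claim_equal_shift_right_arith : Prop := ∀ (bin_num : String) (prepend : Bool), Dom_shift_right_arith bin_num prepend → Pre_shift_right_arith bin_num prepend → Spec_shift_right_arith bin_num prepend (shift_right_arith bin_num prepend)

-- ===== LEMMAS AND PROOFS =====

-- the loop 'for i in range(1, len): to_return[i] = bin_num[i-1]' rewritten over Nat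
lemma fold_pyRange_eq (cs : List Char) (init : List (List Char)) :
    (PySem.List.pyRange 1 (cs.length : Int) 1).foldl
      (fun acc i => acc.set i.toNat [PySem.List.pyGetD cs (i - 1) ' ']) init
    = (List.range (cs.length - 1)).foldl (fun acc k => acc.set (k+1) [cs.getD k ' ']) init := by
  rw [PySem.List.pyRange_one, List.foldl_map]
  have hn : ((cs.length : Int) - 1).toNat = cs.length - 1 := by omega
  rw [hn]
  apply PySem.List.foldl_congr_mem
  intro acc k _
  have h1 : (1 + (k : Int)) - 1 = (k : Int) := by ring
  have h2 : (1 + (k : Int)).toNat = k + 1 := by omega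
  rw [h1, h2, PySem.List.pyGetD_natCast]

-- what the index loop does to the work list: indices 1..m set from cs[0..m-1]
lemma setFold (cs : List Char) : ∀ (m : Nat) (init : List (List Char)),
    m ≤ cs.length → m < init.length →
    (List.range m).foldl (fun acc k => acc.set (k+1) [cs.getD k ' ']) init
    = init.take 1 ++ (cs.take m).map (fun ch => [ch]) ++ init.drop (m+1) := by
  intro m
  induction m with
  | zero =>
    intro init _ _
    simpa using (List.take_append_drop 1 init).symm
  | succ m ih =>
    intro init h1 h2
    rw [List.range_succ, List.foldl_append]
    rw [ih init (by omega) (by omega)]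
    simp only [List.foldl_cons, List.foldl_nil]
    have hm : m < cs.length := by omega
    have hlen1 : (init.take 1).length = 1 := by
      rw [List.length_take]; omega
    have hlenmap : ((cs.take m).map (fun ch => [ch])).length = m := by
      rw [List.length_map, List.length_take]; omega
    have hassoc : init.take 1 ++ (cs.take m).map (fun ch => [ch]) ++ init.drop (m + 1)
        = (init.take 1 ++ (cs.take m).map (fun ch => [ch])) ++ init.drop (m + 1) := rfl
    rw [hassoc, List.set_append_right _ _ (by rw [List.length_append, hlen1, hlenmap]; omega)]
    rw [List.length_append, hlen1, hlenmap]
    have h0 : m + 1 - (1 + m) = 0 := by omega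
    rw [h0]
    have hdrop : init.drop (m+1) = init[m+1] :: init.drop (m+2) := by
      rw [List.drop_eq_getElem_cons h2]
    rw [hdrop]
    simp only [List.set_cons_zero]
    have htake : cs.take (m+1) = cs.take m ++ [cs[m]] := by
      rw [List.take_add_one]
      simp [List.getElem?_eq_getElem hm]
    have hg : cs.getD m ' ' = cs[m] := by
      simp [List.getD_eq_getElem?_getD, List.getElem?_eq_getElem hm]
    rw [htake, hg, List.map_append]
    simp [List.append_assoc]

-- joining a list of singleton strings with "" is concatenating the characters
lemma join_singletons (a : Char) (l : List Char) :
    PySem.Chars.join [] ([a] :: l.map (fun ch => [ch])) = a :: l := by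
  have h : [a] :: l.map (fun ch => [ch]) = (a :: l).map (fun ch => [ch]) := by simp
  rw [h, PySem.Chars.join_nil_singletons]

-- ===== VERDICT (by name: the statement is the Claim_ definition above) =====
theorem shift_right_arith_spec : Claim_equal_shift_right_arith := by
  intro bin_num prepend _ hpre
  unfold Spec_shift_right_arith shift_right_arith shift_right_arith_alt
  unfold Pre_shift_right_arith at hpre
  cases hcs : bin_num.toList with
  | nil => exact absurd hcs hpre
  | cons c rest =>
    dsimp only
    set f0 : List Char :=
      if prepend && (PySem.List.pyGetD (c :: rest) 0 ' ' == '1') then ['1'] else ['0'] with hf0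
    have hpre0 :
        (if prepend then
          (if PySem.List.pyGet? (c :: rest) 0 = some '1' then
            (List.replicate (c :: rest).length ['0']).set 0 ['1']
           else List.replicate (c :: rest).length ['0'])
         else (List.replicate (c :: rest).length ['0']).set 0 ['0'])
        = f0 :: List.replicate rest.length ['0'] := by
      rw [hf0]
      cases prepend with
      | false => simp [List.replicate]
      | true =>
        by_cases hc : c = '1' <;>
          simp [List.replicate, PySem.List.pyGetD_zero_cons, hc]
    rw [hpre0, fold_pyRange_eq]
    have hlen : (c :: rest).length - 1 = rest.length := by simp
    rw [hlen]
    rw [setFold (c :: rest) rest.length (f0 :: List.replicate rest.length ['0'])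
          (by simp) (by simp)]
    have hdropall : (f0 :: List.replicate rest.length ['0']).drop (rest.length + 1) = [] := by
      simp
    have htake1 : (f0 :: List.replicate rest.length ['0']).take 1 = [f0] := by simp
    rw [hdropall, htake1, List.append_nil]
    have htake : (c :: rest).take rest.length = (c :: rest).dropLast := by
      rw [List.dropLast_eq_take]; simp
    rw [htake]
    rw [PySem.List.slice_to_neg_one]
    obtain ⟨a, ha⟩ : ∃ a, f0 = [a] := by
      rw [hf0]
      by_cases h : prepend && (PySem.List.pyGetD (c :: rest) 0 ' ' == '1')
      · exact ⟨'1', by rw [if_pos h]⟩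
      · exact ⟨'0', by rw [if_neg h]⟩
    rw [ha, List.singleton_append, join_singletons]
    rfl
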